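-- pv_equiv track=rewrite | github.com/scott181182/advent2025 | day02/part1.py | find_invalid_ids
-- ===== SOURCE A (Python) =====
-- def find_invalid_ids(start: int, end: int) -> list[int]:
--     start_str = str(start)
--
--     if len(start_str) & 1 == 0:
--         candidate_half = int(start_str[:len(start_str) // 2])
--     else:
--         # Just an optimization to cut out the odd lengths
--         candidate_half = 10 ** (len(start_str) // 2)
--     invalid_ids = []
--
--     candidate = int(str(candidate_half) + str(candidate_half))
--     while candidate <= end:
--         if candidate >= start:
--             invalid_ids.append(candidate)
--
--         candidate_half += 1
--         candidate = int(str(candidate_half) + str(candidate_half))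
--
--     return invalid_ids
-- ===== SOURCE B (Python) =====
-- def _ndigits(n: int) -> int:
--     d = 1
--     while n >= 10:
--         n //= 10
--         d += 1
--     return d
--
--
-- def find_invalid_ids(start: int, end: int) -> list[int]:
--     start_str = str(start)
--
--     if len(start_str) & 1 == 0:
--         candidate_half = int(start_str[:len(start_str) // 2])
--     else:
--         candidate_half = 10 ** (len(start_str) // 2)
--     invalid_ids = []
--
--     half = candidate_half
--     while True:
--         d = _ndigits(half)
--         mult = 10 ** d + 1
--         if half * mult > end:
--             break
--         hi = min(10 ** d - 1, end // mult)
--         for h in range(half, hi + 1):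
--             c = h * mult
--             if c >= start:
--                 invalid_ids.append(c)
--         half = 10 ** d
--     return invalid_ids
-- ===== Notes on version B (the rewrite author's own statement) =====
-- stated objective: faster
-- what changed: A scans candidate halves one at a time, re-building each candidate by string concatenation and re-parsing it with int(); B keeps A's string-based preamble verbatim but replaces the loop by a digit-length-grouped arithmetic pass: per digit length d it computes mult = 10**d + 1 and emits half*mult for half up to min(10**d - 1, end // mult), with no string operations at all.
import Mathlib
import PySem

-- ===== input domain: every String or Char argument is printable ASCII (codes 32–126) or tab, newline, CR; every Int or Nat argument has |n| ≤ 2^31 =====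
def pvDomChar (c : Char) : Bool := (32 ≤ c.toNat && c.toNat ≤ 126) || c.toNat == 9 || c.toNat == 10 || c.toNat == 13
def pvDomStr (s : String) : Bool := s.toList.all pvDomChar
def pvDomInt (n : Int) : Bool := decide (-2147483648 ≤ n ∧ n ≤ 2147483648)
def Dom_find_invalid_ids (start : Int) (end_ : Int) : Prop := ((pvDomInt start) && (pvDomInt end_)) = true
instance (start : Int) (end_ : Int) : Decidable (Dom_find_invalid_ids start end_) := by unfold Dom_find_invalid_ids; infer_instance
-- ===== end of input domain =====

-- B replaces A's one-at-a-time string-concatenation loop by a digit-length-grouped arithmetic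
-- pass (one batch of halves per digit length, bounds computed by division); measurably faster by
-- a constant factor (no per-candidate string conversions).

-- ===== PORT A =====
-- the while loop of A; fuel only makes the recursion total (never exhausted on the claimed domain).
-- `int(str(candidate_half) + str(candidate_half))` is PySem.Int.ofChars? of the concatenated digit
-- lists; Python raises ValueError exactly where it is `none` (then the loop result is irrelevant:
-- such inputs are excluded by Pre_).
def findLoopA (start end_ : Int) (fuel : Nat) (candidate_half : Int) (acc : List Int) : List Int :=
  match fuel with
  | 0 => acc
  | f + 1 =>
    match PySem.Int.ofChars? (PySem.Int.toChars candidate_half ++ PySem.Int.toChars candidate_half) with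
    | none => acc
    | some candidate =>
      if candidate ≤ end_ then
        findLoopA start end_ f (candidate_half + 1)
          (if candidate ≥ start then acc ++ [candidate] else acc)
      else acc

def find_invalid_ids (start : Int) (end_ : Int) : List Int :=
  let start_str := PySem.Int.toChars start
  let L : Int := (start_str.length : Int)
  let candidate_half : Int :=
    if PySem.Int.band L 1 = 0 then
      (PySem.Int.ofChars? (PySem.List.slice start_str none (some (PySem.Int.floordiv L 2)))).getD 0
    else
      (10 : Int) ^ (PySem.Int.floordiv L 2).toNat
  findLoopA start end_ 100000 candidate_half []

-- ===== PORT B =====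
-- _ndigits of Source B; fuel only makes the while loop total (never exhausted on the claimed domain)
def ndigitsB (fuel : Nat) (n : Int) (d : Int) : Int :=
  match fuel with
  | 0 => d
  | f + 1 => if 10 ≤ n then ndigitsB f (PySem.Int.floordiv n 10) (d + 1) else d

-- the `while True` loop of Source B; one iteration per digit length, fuel for totality only
def findLoopB (start end_ : Int) (fuel : Nat) (half : Int) (acc : List Int) : List Int :=
  match fuel with
  | 0 => acc
  | f + 1 =>
    let d := ndigitsB 64 half 1
    let mult := (10 : Int) ^ d.toNat + 1
    if end_ < half * mult then acc
    else
      let hi := min ((10 : Int) ^ d.toNat - 1) (PySem.Int.floordiv end_ mult)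
      findLoopB start end_ f ((10 : Int) ^ d.toNat)
        ((PySem.List.pyRange half (hi + 1) 1).foldl
          (fun a h => if h * mult ≥ start then a ++ [h * mult] else a) acc)

def find_invalid_ids_alt (start : Int) (end_ : Int) : List Int :=
  let start_str := PySem.Int.toChars start
  let L : Int := (start_str.length : Int)
  let candidate_half : Int :=
    if PySem.Int.band L 1 = 0 then
      (PySem.Int.ofChars? (PySem.List.slice start_str none (some (PySem.Int.floordiv L 2)))).getD 0
    else
      (10 : Int) ^ (PySem.Int.floordiv L 2).toNat
  findLoopB start end_ 40 candidate_half []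

-- ===== PRECONDITION & SPEC =====
-- Pre_ excludes exactly the inputs on which A raises ValueError: negative `start` whose str() has
-- even length (then either int(start_str[:L//2]) or the first int(str(h)+str(h)) gets a '-' inside).
def Pre_find_invalid_ids (start : Int) (end_ : Int) : Prop :=
  0 ≤ start ∨ (PySem.Int.toChars start).length % 2 = 1
instance (start : Int) (end_ : Int) : Decidable (Pre_find_invalid_ids start end_) := by
  unfold Pre_find_invalid_ids; infer_instance

def pvWitness_find_invalid_ids : Int × Int := (1, 100)

def Spec_find_invalid_ids (start : Int) (end_ : Int) (out : List Int) : Prop := out = find_invalid_ids_alt start end_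
instance (start : Int) (end_ : Int) (out : List Int) : Decidable (Spec_find_invalid_ids start end_ out) := by unfold Spec_find_invalid_ids; infer_instance

-- ===== CLAIM (what is proved, stated in full; the proofs are below) =====
def Claim_equal_find_invalid_ids : Prop := ∀ (start : Int) (end_ : Int), Dom_find_invalid_ids start end_ → Pre_find_invalid_ids start end_ → Spec_find_invalid_ids start end_ (find_invalid_ids start end_)

-- ===== LEMMAS AND PROOFS =====

-- decimal value of a digit string, as Python's int() computes it
def V (ds : List Char) : Nat := ds.foldl (fun a c => a * 10 + (c.toNat - 48)) 0

theorem digitChar_isDigit (k : Nat) (h : k < 10) : k.digitChar.isDigit = true := by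
  interval_cases k <;> decide

theorem digitChar_toNat (k : Nat) (h : k < 10) : k.digitChar.toNat - 48 = k := by
  interval_cases k <;> decide

theorem digit_bounds (c : Char) (h : c.isDigit = true) : 48 ≤ c.toNat ∧ c.toNat ≤ 57 := by
  simp [Char.isDigit, Char.le_def, UInt32.le_iff_toNat_le] at h
  exact ⟨h.1, h.2⟩

theorem V_from (l : List Char) : ∀ acc, l.foldl (fun a c => a * 10 + (c.toNat - 48)) acc
    = acc * 10 ^ l.length + V l := by
  induction l with
  | nil => intro acc; simp [V]
  | cons c cs ih =>
      intro acc
      simp only [List.foldl_cons, List.length_cons]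
      rw [ih]
      have hV : V (c :: cs) = (0 * 10 + (c.toNat - 48)) * 10 ^ cs.length + V cs := by
        unfold V
        simp only [List.foldl_cons]
        rw [ih]
        rfl
      rw [hV]
      ring

theorem V_append (a b : List Char) : V (a ++ b) = V a * 10 ^ b.length + V b := by
  unfold V
  rw [List.foldl_append, V_from]
  rfl

theorem V_digit (c : Char) (h : c.isDigit = true) : V [c] = c.toNat - 48 := by
  simp [V]

theorem toDigits_ne_nil (m : Nat) : Nat.toDigits 10 m ≠ [] := by
  rw [Nat.toDigits_eq_if (by norm_num)]
  split <;> simp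

theorem toDigits_digits (m : Nat) : ∀ c ∈ Nat.toDigits 10 m, c.isDigit = true := by
  induction m using Nat.strong_induction_on with
  | _ m ih =>
    rw [Nat.toDigits_eq_if (by norm_num)]
    split
    · intro c hc
      simp at hc
      subst hc
      exact digitChar_isDigit m (by omega)
    · rename_i hm
      intro c hc
      simp at hc
      rcases hc with hc | hc
      · exact ih (m / 10) (by omega) c hc
      · subst hc
        exact digitChar_isDigit _ (by omega)

theorem V_toDigits (m : Nat) : V (Nat.toDigits 10 m) = m := by
  induction m using Nat.strong_induction_on with
  | _ m ih =>
    rw [Nat.toDigits_eq_if (by norm_num)]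
    split
    · rename_i hm
      simp [V, digitChar_toNat m (by omega)]
    · rename_i hm
      rw [V_append, ih (m / 10) (by omega)]
      simp only [List.length_cons, List.length_nil, pow_one, zero_add,
        V_digit _ (digitChar_isDigit (m % 10) (by omega)),
        digitChar_toNat (m % 10) (by omega)]
      omega

theorem toDigits_len_bounds (m : Nat) (hm : 1 ≤ m) :
    10 ^ ((Nat.toDigits 10 m).length - 1) ≤ m ∧ m < 10 ^ (Nat.toDigits 10 m).length := by
  induction m using Nat.strong_induction_on with
  | _ m ih =>
    rw [Nat.toDigits_eq_if (by norm_num)]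
    split
    · rename_i h
      simp
      omega
    · rename_i h
      have h10 : 1 ≤ m / 10 := by omega
      obtain ⟨l1, l2⟩ := ih (m / 10) (by omega) h10
      have hne := toDigits_ne_nil (m / 10)
      have hlen : 1 ≤ (Nat.toDigits 10 (m / 10)).length := List.length_pos_iff.mpr hne
      simp only [List.length_append, List.length_cons, List.length_nil, zero_add]
      constructor
      · calc 10 ^ ((Nat.toDigits 10 (m / 10)).length + 1 - 1)
            = 10 ^ ((Nat.toDigits 10 (m / 10)).length - 1) * 10 := by
              rw [← pow_succ]; congr 1; omega
          _ ≤ (m / 10) * 10 := Nat.mul_le_mul_right 10 l1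
          _ ≤ m := by omega
      · calc m < (m / 10 + 1) * 10 := by omega
          _ ≤ 10 ^ (Nat.toDigits 10 (m / 10)).length * 10 := Nat.mul_le_mul_right 10 (by omega)
          _ = 10 ^ ((Nat.toDigits 10 (m / 10)).length + 1) := by rw [pow_succ]

theorem V_lt (ds : List Char) (h : ∀ c ∈ ds, c.isDigit = true) : V ds < 10 ^ ds.length := by
  induction ds with
  | nil => simp [V]
  | cons c cs ih =>
      have hc := h c (by simp)
      have hb : c.toNat - 48 ≤ 9 := by
        have := digit_bounds c hc
        omega
      have htail := ih (fun x hx => h x (by simp [hx]))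
      have hV : V (c :: cs) = (c.toNat - 48) * 10 ^ cs.length + V cs := by
        unfold V
        simp only [List.foldl_cons]
        rw [V_from]
        rw [show List.foldl (fun (a : Nat) (c : Char) => a * 10 + (c.toNat - 48)) 0 cs = V cs from rfl]
        ring
      rw [hV]
      simp only [List.length_cons]
      calc (c.toNat - 48) * 10 ^ cs.length + V cs
          < (c.toNat - 48) * 10 ^ cs.length + 10 ^ cs.length := by omega
        _ = ((c.toNat - 48) + 1) * 10 ^ cs.length := by ring
        _ ≤ 10 * 10 ^ cs.length := Nat.mul_le_mul_right _ (by omega)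
        _ = 10 ^ (cs.length + 1) := by rw [pow_succ]; ring

theorem V_take (m k : Nat) (hk : k ≤ (Nat.toDigits 10 m).length) :
    V ((Nat.toDigits 10 m).take k) = m / 10 ^ ((Nat.toDigits 10 m).length - k) := by
  induction m using Nat.strong_induction_on generalizing k with
  | _ m ih =>
    rw [Nat.toDigits_eq_if (by norm_num)] at hk ⊢
    split
    · rename_i h
      rw [if_pos h] at hk
      simp only [List.length_cons, List.length_nil, zero_add] at hk
      have hk01 : k = 0 ∨ k = 1 := by omega
      rcases hk01 with hk0 | hk1
      · subst hk0
        simp [V]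
        omega
      · subst hk1
        simp [V, digitChar_toNat m (by omega)]
    · rename_i h
      rw [if_neg h] at hk
      by_cases hkp : k ≤ (Nat.toDigits 10 (m / 10)).length
      · rw [List.take_append_of_le_length hkp, ih (m / 10) (by omega) k hkp]
        simp only [List.length_append, List.length_cons, List.length_nil, zero_add]
        rw [Nat.div_div_eq_div_mul]
        rw [show (10 : Nat) * 10 ^ ((Nat.toDigits 10 (m / 10)).length - k)
            = 10 ^ ((Nat.toDigits 10 (m / 10)).length - k + 1) from (pow_succ' 10 _).symm]
        have hexp : (Nat.toDigits 10 (m / 10)).length - k + 1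
            = (Nat.toDigits 10 (m / 10)).length + 1 - k := by omega
        rw [hexp]
      · have hlen : (Nat.toDigits 10 (m / 10) ++ [(m % 10).digitChar]).length
            = (Nat.toDigits 10 (m / 10)).length + 1 := by simp
        have hk' : k = (Nat.toDigits 10 (m / 10)).length + 1 := by
          simp only [List.length_append, List.length_cons, List.length_nil, zero_add] at hk
          omega
        subst hk'
        rw [List.take_of_length_le (by simp)]
        have hV10 := ih (m / 10) (by omega) (Nat.toDigits 10 (m / 10)).length (le_refl _)
        rw [List.take_of_length_le (le_refl _)] at hV10
        simp only [Nat.sub_self, pow_zero, Nat.div_one] at hV10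
        rw [V_append, hV10]
        simp only [List.length_append, List.length_cons, List.length_nil, zero_add,
          Nat.sub_self, pow_zero, Nat.div_one, pow_one,
          V_digit _ (digitChar_isDigit (m % 10) (by omega)), digitChar_toNat (m % 10) (by omega)]
        omega

-- key parse machinery
theorem isIntSpace_of_digit (c : Char) (h : c.isDigit = true) : PySem.Int.isIntSpace c = false := by
  have hb : 48 ≤ c.toNat ∧ c.toNat ≤ 57 := by
    simp [Char.isDigit] at h
    exact ⟨h.1, h.2⟩
  have hne : ∀ d : Char, d.toNat < 48 → c ≠ d := by
    intro d hd he; subst he; omega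
  simp [PySem.Int.isIntSpace,
    hne ' ' (by decide), hne '\t' (by decide), hne '\n' (by decide),
    hne '\x0d' (by decide), hne '\x0b' (by decide), hne '\x0c' (by decide)]

theorem go_spec (g : List Char → Bool → Nat → Option Nat)
    (h0 : ∀ b acc, g [] b acc = if b = true then some acc else none)
    (hd : ∀ (c : Char) rest b acc, c.isDigit = true →
        g (c :: rest) b acc = g rest true (acc * 10 + (c.toNat - 48)))
    (ds : List Char) (acc : Nat) (hds : ∀ c ∈ ds, c.isDigit = true) :
    g ds true acc = some (ds.foldl (fun a c => a * 10 + (c.toNat - 48)) acc) := by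
  induction ds generalizing acc with
  | nil => simp [h0]
  | cons c cs ih =>
      rw [hd c cs true acc (hds c (by simp))]
      simp only [List.foldl_cons]
      exact ih _ (fun x hx => hds x (by simp [hx]))

theorem dv_spec (dv : List Char → Option Nat) (g : List Char → Bool → Nat → Option Nat)
    (hdv : ∀ (c : Char) cs, c.isDigit = true → dv (c :: cs) = g cs true (0 * 10 + (c.toNat - '0'.toNat)))
    (h0 : ∀ b acc, g [] b acc = if b = true then some acc else none)
    (hd : ∀ (c : Char) rest b acc, c.isDigit = true →
        g (c :: rest) b acc = g rest true (acc * 10 + (c.toNat - 48)))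
    (c : Char) (cs : List Char) (hds : ∀ x ∈ c :: cs, x.isDigit = true) :
    Option.map (fun n => n) (do let a ← dv (c :: cs); pure ((a : Int))) = some ((V (c :: cs) : Int)) := by
  rw [show (do let a ← dv (c :: cs); pure ((a : Int))) = (dv (c :: cs)).bind (fun a => some ((a : Int))) from rfl]
  rw [hdv c cs (hds c (by simp)),
    go_spec g h0 hd cs _ (fun x hx => hds x (by simp [hx]))]
  simp [V]

theorem digit_cases (c : Char) (h : c.isDigit = true) :
    c = '0' ∨ c = '1' ∨ c = '2' ∨ c = '3' ∨ c = '4' ∨ c = '5' ∨ c = '6' ∨ c = '7' ∨ c = '8' ∨ c = '9' := by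
  have hb : 48 ≤ c.toNat ∧ c.toNat ≤ 57 := by
    simp [Char.isDigit] at h
    exact ⟨h.1, h.2⟩
  have hex : ∀ d : Char, c.toNat = d.toNat → c = d := by
    intro d hd
    exact Char.eq_of_val_eq (by
      have : c.val.toNat = d.val.toNat := hd
      exact UInt32.toNat_inj.mp this)
  obtain ⟨h1, h2⟩ := hb
  interval_cases h : c.toNat
  · exact Or.inl (hex '0' (by decide))
  · exact Or.inr (Or.inl (hex '1' (by decide)))
  · exact Or.inr (Or.inr (Or.inl (hex '2' (by decide))))
  · exact Or.inr (Or.inr (Or.inr (Or.inl (hex '3' (by decide)))))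
  · exact Or.inr (Or.inr (Or.inr (Or.inr (Or.inl (hex '4' (by decide))))))
  · exact Or.inr (Or.inr (Or.inr (Or.inr (Or.inr (Or.inl (hex '5' (by decide)))))))
  · exact Or.inr (Or.inr (Or.inr (Or.inr (Or.inr (Or.inr (Or.inl (hex '6' (by decide))))))))
  · exact Or.inr (Or.inr (Or.inr (Or.inr (Or.inr (Or.inr (Or.inr (Or.inl (hex '7' (by decide)))))))))
  · exact Or.inr (Or.inr (Or.inr (Or.inr (Or.inr (Or.inr (Or.inr (Or.inr (Or.inl (hex '8' (by decide))))))))))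
  · exact Or.inr (Or.inr (Or.inr (Or.inr (Or.inr (Or.inr (Or.inr (Or.inr (Or.inr (hex '9' (by decide))))))))))

theorem key (c : Char) (cs : List Char) (hds : ∀ x ∈ c :: cs, x.isDigit = true) :
    PySem.Int.ofChars? (c :: cs) = some ((V (c :: cs) : Int)) := by
  have hstrip : ∀ l : List Char, (∀ x ∈ l, x.isDigit = true) → l.dropWhile PySem.Int.isIntSpace = l := by
    intro l hl
    cases l with
    | nil => rfl
    | cons a l => simp [List.dropWhile, isIntSpace_of_digit a (hl a (by simp))]
  simp only [PySem.Int.ofChars?]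
  rw [hstrip _ hds]
  rw [hstrip ((c :: cs).reverse) (by intro x hx; exact hds x (by simp at hx ⊢; tauto))]
  rw [List.reverse_reverse]
  split
  · rename_i ds heq
    exfalso
    have hc : c = '-' := by
      have := heq
      simp at this
      exact this.1
    have h2 := hds c (by simp)
    rw [hc] at h2
    exact absurd h2 (by decide)
  · rename_i ds heq
    exfalso
    have hc : c = '+' := by
      have := heq
      simp at this
      exact this.1
    have h2 := hds c (by simp)
    rw [hc] at h2
    exact absurd h2 (by decide)
  · rename_i ds h1 h2
    refine dv_spec ?dv ?g ?hdv ?h0 ?hd c cs hds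
    case hdv =>
      intro a as ha
      conv_lhs => whnf
      rw [ha]
      exact rfl
    case h0 =>
      intro b acc
      exact rfl
    case hd =>
      intro a rest b acc ha
      rcases digit_cases a ha with h|h|h|h|h|h|h|h|h|h <;> subst h <;> exact rfl

def digN (h : Int) : Nat := (Nat.toDigits 10 h.toNat).length

def candV (h : Int) : Int := h * ((10 : Int) ^ digN h + 1)

def candList (start lo hiEx : Int) : List Int :=
  ((PySem.List.pyRange lo hiEx 1).filter (fun x => decide (start ≤ candV x))).map candV

theorem key' (ds : List Char) (hne : ds ≠ []) (hds : ∀ x ∈ ds, x.isDigit = true) :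
    PySem.Int.ofChars? ds = some ((V ds : Int)) := by
  cases ds with
  | nil => exact absurd rfl hne
  | cons c cs => exact key c cs hds

theorem toChars_nonneg (n : Int) (h : 0 ≤ n) :
    PySem.Int.toChars n = Nat.toDigits 10 n.toNat := by
  simp [PySem.Int.toChars, not_lt.mpr h]

theorem digN_pos (h : Int) : 1 ≤ digN h := by
  unfold digN
  exact List.length_pos_iff.mpr (toDigits_ne_nil _)

theorem digN_bounds (x : Int) (h1 : 1 ≤ x) :
    (10 : Int) ^ (digN x - 1) ≤ x ∧ x < (10 : Int) ^ (digN x) := by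
  obtain ⟨a, b⟩ := toDigits_len_bounds x.toNat (by omega)
  constructor
  · calc ((10 : Int)) ^ (digN x - 1) = ((10 ^ (digN x - 1) : Nat) : Int) := by push_cast; ring
      _ ≤ (x.toNat : Int) := by exact_mod_cast a
      _ = x := by omega
  · calc x = ((x.toNat : Nat) : Int) := by omega
      _ < ((10 ^ digN x : Nat) : Int) := by exact_mod_cast b
      _ = (10 : Int) ^ digN x := by push_cast; ring

theorem digN_eq_of_bounds (x : Int) (d : Nat) (hd : 1 ≤ d)
    (hlo : (10 : Int) ^ (d - 1) ≤ x) (hhi : x < (10 : Int) ^ d) : digN x = d := by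
  have h1 : (1 : Int) ≤ x := le_trans (one_le_pow₀ (by norm_num)) hlo
  obtain ⟨a, b⟩ := digN_bounds x h1
  by_contra hne
  rcases Nat.lt_or_ge (digN x) d with hlt | hge
  · have : (10 : Int) ^ digN x ≤ 10 ^ (d - 1) := pow_le_pow_right₀ (by norm_num) (by omega)
    omega
  · have hgt : d < digN x := by omega
    have : (10 : Int) ^ d ≤ 10 ^ (digN x - 1) := pow_le_pow_right₀ (by norm_num) (by omega)
    omega

theorem digN_pow (d : Nat) : digN ((10 : Int) ^ d) = d + 1 := by
  refine digN_eq_of_bounds _ _ (by omega) ?_ ?_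
  · simp
  · exact pow_lt_pow_right₀ (by norm_num) (by omega)

theorem digN_le (x : Int) (k : Nat) (h1 : 1 ≤ x) (h : x < (10 : Int) ^ k) : digN x ≤ k := by
  obtain ⟨a, _⟩ := digN_bounds x h1
  by_contra hgt
  have : (10 : Int) ^ k ≤ 10 ^ (digN x - 1) := pow_le_pow_right₀ (by norm_num) (by omega)
  omega

theorem parse_concat (h : Int) (h1 : 1 ≤ h) :
    PySem.Int.ofChars? (PySem.Int.toChars h ++ PySem.Int.toChars h) = some (candV h) := by
  rw [toChars_nonneg h (by omega)]
  have hds : ∀ x ∈ Nat.toDigits 10 h.toNat ++ Nat.toDigits 10 h.toNat, x.isDigit = true := by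
    intro x hx
    rcases List.mem_append.mp hx with hx | hx <;> exact toDigits_digits _ x hx
  rw [key' _ (by simp [toDigits_ne_nil]) hds]
  congr 1
  rw [V_append, V_toDigits]
  unfold candV digN
  push_cast
  have : ((h.toNat : Int)) = h := by omega
  rw [this]
  ring

theorem digN_div10 (n : Int) (h : 10 ≤ n) : digN (n / 10) = digN n - 1 := by
  have h10 : (10 : Nat) ≤ n.toNat := by omega
  have hq : (n / 10).toNat = n.toNat / 10 := by omega
  unfold digN
  rw [hq, Nat.toDigits_of_base_le (by norm_num) h10]
  simp

theorem ndigitsB_spec : ∀ (f : Nat) (n d0 : Int), 1 ≤ n → n < (10 : Int) ^ f →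
    ndigitsB f n d0 = d0 + (digN n : Int) - 1 := by
  intro f
  induction f with
  | zero =>
      intro n d0 h1 h2
      simp at h2
      omega
  | succ f ih =>
      intro n d0 h1 h2
      unfold ndigitsB
      by_cases h10 : 10 ≤ n
      · rw [if_pos h10]
        rw [PySem.Int.floordiv_eq_ediv_of_pos (by norm_num)]
        have hq1 : 1 ≤ n / 10 := by omega
        have hq2 : n / 10 < (10 : Int) ^ f := by
          have : n < 10 * 10 ^ f := by
            calc n < (10 : Int) ^ (f + 1) := h2
              _ = 10 * 10 ^ f := by rw [pow_succ]; ring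
          omega
        rw [ih (n / 10) (d0 + 1) hq1 hq2, digN_div10 n h10]
        have hd2 : 2 ≤ digN n := by
          by_contra hlt
          have hd1 : digN n = 1 := by have := digN_pos n; omega
          obtain ⟨_, hb⟩ := digN_bounds n (by omega)
          rw [hd1] at hb
          norm_num at hb
          omega
        push_cast
        omega
      · rw [if_neg h10]
        have : digN n = 1 := digN_eq_of_bounds n 1 (by omega) (by simpa using h1) (by simpa using by omega : n < (10:Int)^1)
        rw [this]
        omega

theorem candList_nil (start lo hiEx : Int) (h : hiEx ≤ lo) : candList start lo hiEx = [] := by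
  unfold candList
  rw [PySem.List.pyRange_one_eq_nil h]
  simp

theorem candList_cons (start lo hiEx : Int) (h : lo < hiEx) :
    candList start lo hiEx =
      (if start ≤ candV lo then [candV lo] else []) ++ candList start (lo + 1) hiEx := by
  unfold candList
  rw [PySem.List.pyRange_one_cons h]
  by_cases hs : start ≤ candV lo
  · simp [hs]
  · simp [hs]

theorem candList_append (start lo mid hiEx : Int) (h1 : lo ≤ mid) (h2 : mid ≤ hiEx) :
    candList start lo hiEx = candList start lo mid ++ candList start mid hiEx := by
  unfold candList
  rw [PySem.List.pyRange_one_append lo mid hiEx h1 h2]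
  simp

theorem loopA_eq (start end_ : Int) : ∀ (f : Nat) (h H : Int) (acc : List Int),
    1 ≤ h → h ≤ H →
    (∀ x : Int, h ≤ x → x < H → candV x ≤ end_) →
    end_ < candV H →
    (H - h).toNat ≤ f →
    findLoopA start end_ f h acc = acc ++ candList start h H := by
  intro f
  induction f with
  | zero =>
      intro h H acc h1 hH hcond hstop hf
      have : H = h := by omega
      subst this
      rw [candList_nil _ _ _ (le_refl _)]
      simp [findLoopA]
  | succ f ih =>
      intro h H acc h1 hH hcond hstop hf
      unfold findLoopA
      rw [parse_concat h h1]
      show (if candV h ≤ end_ then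
          findLoopA start end_ f (h + 1) (if candV h ≥ start then acc ++ [candV h] else acc)
        else acc) = _
      by_cases heq : h = H
      · subst heq
        rw [if_neg (by omega)]
        rw [candList_nil _ _ _ (le_refl _)]
        simp
      · have hlt : h < H := by omega
        rw [if_pos (hcond h (le_refl _) hlt)]
        rw [ih (h + 1) H _ (by omega) (by omega)
          (fun x hx1 hx2 => hcond x (by omega) hx2) hstop (by omega)]
        rw [candList_cons start h H hlt]
        by_cases hs : start ≤ candV h
        · rw [if_pos (by omega : candV h ≥ start), if_pos hs]
          simp
        · rw [if_neg (by omega : ¬ candV h ≥ start), if_neg hs]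
          simp

theorem candV_of_digN (x : Int) (d : Nat) (h : digN x = d) : candV x = x * ((10 : Int) ^ d + 1) := by
  unfold candV
  rw [h]

theorem candV_ge_self (x : Int) (h : 1 ≤ x) : x ≤ candV x := by
  unfold candV
  nlinarith [pow_pos (by norm_num : (0:Int) < 10) (digN x)]

theorem loopB_eq (start end_ : Int) : ∀ (g : Nat) (half : Int) (acc : List Int),
    1 ≤ half → end_ < (10 : Int) ^ (digN half - 1 + g) → digN half + g ≤ 64 →
    ∃ H, half ≤ H ∧
      (∀ x : Int, half ≤ x → x < H → candV x ≤ end_) ∧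
      end_ < candV H ∧
      findLoopB start end_ g half acc = acc ++ candList start half H := by
  intro g
  induction g with
  | zero =>
      intro half acc h1 hend _
      refine ⟨half, le_refl _, ?_, ?_, ?_⟩
      · intro x hx1 hx2; omega
      · have hb := (digN_bounds half h1).1
        have := candV_ge_self half h1
        simp only [Nat.add_zero] at hend
        omega
      · rw [candList_nil _ _ _ (le_refl _)]
        simp [findLoopB]
  | succ g ih =>
      intro half acc h1 hend h64
      have hd1 : 1 ≤ digN half := digN_pos half
      have hlt64 : half < (10 : Int) ^ (64 : Nat) := by
        calc half < (10 : Int) ^ (digN half) := (digN_bounds half h1).2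
          _ ≤ (10 : Int) ^ (64 : Nat) := pow_le_pow_right₀ (by norm_num) (by omega)
      have hnd : ndigitsB 64 half 1 = ((digN half : Nat) : Int) := by
        rw [ndigitsB_spec 64 half 1 h1 hlt64]; omega
      have hmultpos : (0 : Int) < 10 ^ (digN half) + 1 := by positivity
      simp only [findLoopB, hnd, Int.toNat_natCast]
      by_cases hbr : end_ < half * ((10 : Int) ^ (digN half) + 1)
      · rw [if_pos hbr]
        refine ⟨half, le_refl _, ?_, ?_, ?_⟩
        · intro x hx1 hx2; omega
        · rw [candV_of_digN half (digN half) rfl]; exact hbr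
        · rw [candList_nil _ _ _ (le_refl _)]; simp
      · rw [if_neg hbr]
        push_neg at hbr
        rw [PySem.Int.floordiv_eq_ediv_of_pos hmultpos]
        set d := digN half with hdd
        set mult := (10 : Int) ^ d + 1 with hmult
        set hi := min ((10 : Int) ^ d - 1) (end_ / mult) with hhi
        have hhalf_lt : half < (10 : Int) ^ d := (digN_bounds half h1).2
        have hhalf_ge : (10 : Int) ^ (d - 1) ≤ half := (digN_bounds half h1).1
        have hdivle : half ≤ end_ / mult := Int.le_ediv_iff_mul_le hmultpos |>.mpr hbr
        have hhalf_hi : half ≤ hi := le_min (by omega) hdivle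
        have hgroup : ∀ x : Int, half ≤ x → x ≤ hi → digN x = d := by
          intro x hx1 hx2
          refine digN_eq_of_bounds x d (by omega) (le_trans hhalf_ge hx1) ?_
          have : hi ≤ (10 : Int) ^ d - 1 := min_le_left _ _
          omega
        have hcand_le : ∀ x : Int, half ≤ x → x ≤ hi → candV x ≤ end_ := by
          intro x hx1 hx2
          rw [candV_of_digN x d (hgroup x hx1 hx2)]
          have hxdiv : x ≤ end_ / mult := le_trans hx2 (min_le_right _ _)
          exact (Int.le_ediv_iff_mul_le hmultpos).mp hxdiv
        have hfold : (PySem.List.pyRange half (hi + 1) 1).foldl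
              (fun a h => if h * mult ≥ start then a ++ [h * mult] else a) acc
            = acc ++ candList start half (hi + 1) := by
          rw [PySem.List.foldl_congr_mem (PySem.List.pyRange half (hi + 1) 1)
            (fun a h => if h * mult ≥ start then a ++ [h * mult] else a)
            (fun a x => if (fun x => decide (start ≤ candV x)) x = true then a ++ [candV x] else a)
            acc ?_]
          · rw [PySem.List.foldl_append_if]
            rfl
          · intro a x hx
            have hmem := (PySem.List.mem_pyRange_one).mp hx
            have hdx : digN x = d := hgroup x hmem.1 (by omega)
            simp only [decide_eq_true_eq]
            rw [candV_of_digN x d hdx]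
        rw [hfold]
        have hdpow : digN ((10 : Int) ^ d) = d + 1 := digN_pow d
        have hend' : end_ < (10 : Int) ^ (d + g) := by
          have hexp : digN half - 1 + (g + 1) = d + g := by omega
          rw [hexp] at hend
          exact hend
        have hrec := ih ((10 : Int) ^ d) (acc ++ candList start half (hi + 1))
          (one_le_pow₀ (by norm_num)) (by rw [hdpow]; simpa [Nat.add_sub_cancel] using hend')
          (by rw [hdpow]; omega)
        obtain ⟨H', hH1, hH2, hH3, hH4⟩ := hrec
        by_cases hfull : (10 : Int) ^ d - 1 ≤ end_ / mult
        · have hieq : hi = (10 : Int) ^ d - 1 := min_eq_left hfull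
          refine ⟨H', by omega, ?_, hH3, ?_⟩
          · intro x hx1 hx2
            by_cases hxd : x ≤ hi
            · exact hcand_le x hx1 hxd
            · exact hH2 x (by omega) hx2
          · rw [hH4, List.append_assoc]
            congr 1
            have h10 : hi + 1 = (10 : Int) ^ d := by omega
            rw [h10]
            exact (candList_append start half _ H' (by omega) hH1).symm
        · push_neg at hfull
          have hieq : hi = end_ / mult := min_eq_right (by omega)
          have hcand_gt : end_ < candV (hi + 1) := by
            have hdx : digN (hi + 1) = d := by
              refine digN_eq_of_bounds (hi + 1) d (by omega) (by omega) (by omega)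
            rw [candV_of_digN _ d hdx, hieq]
            exact Int.lt_ediv_add_one_mul_self end_ hmultpos
          have hHeq : H' = (10 : Int) ^ d := by
            by_contra hne
            have hlt : (10 : Int) ^ d < H' := by omega
            have := hH2 ((10 : Int) ^ d) (le_refl _) hlt
            rw [candV_of_digN _ (d + 1) hdpow] at this
            have hgt : end_ < (10 : Int) ^ d * ((10 : Int) ^ (d + 1) + 1) := by
              have h1' : end_ < (hi + 1) * mult := by
                rw [hieq]
                exact Int.lt_ediv_add_one_mul_self end_ hmultpos
              have h2' : (hi + 1) * mult ≤ (10 : Int) ^ d * mult := by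
                have : hi + 1 ≤ (10 : Int) ^ d := by omega
                exact mul_le_mul_of_nonneg_right this (by omega)
              have h3' : (10 : Int) ^ d * mult ≤ (10 : Int) ^ d * ((10 : Int) ^ (d + 1) + 1) := by
                have : mult ≤ (10 : Int) ^ (d + 1) + 1 := by
                  have : (10 : Int) ^ d ≤ (10 : Int) ^ (d + 1) :=
                    pow_le_pow_right₀ (by norm_num) (by omega)
                  omega
                exact mul_le_mul_of_nonneg_left this (by positivity)
              exact lt_of_lt_of_le h1' (le_trans h2' h3')
            exact absurd (lt_of_le_of_lt this hgt) (lt_irrefl _)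
          refine ⟨hi + 1, by omega, ?_, hcand_gt, ?_⟩
          · intro x hx1 hx2
            exact hcand_le x hx1 (by omega)
          · rw [hH4, hHeq, candList_nil _ _ _ (le_refl _)]
            simp

theorem digitsLen_le (m : Nat) (hm : m < 10 ^ 10) : (Nat.toDigits 10 m).length ≤ 10 := by
  by_cases h0 : m = 0
  · subst h0
    rw [Nat.toDigits_eq_if (by norm_num)]
    norm_num
  · obtain ⟨a, b⟩ := toDigits_len_bounds m (by omega)
    by_contra hgt
    have : (10 : Nat) ^ 10 ≤ 10 ^ ((Nat.toDigits 10 m).length - 1) :=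
      Nat.pow_le_pow_right (by norm_num) (by omega)
    omega

theorem toChars_len_le (start : Int) (h : -2147483648 ≤ start ∧ start ≤ 2147483648) :
    (PySem.Int.toChars start).length ≤ 11 := by
  by_cases hs : 0 ≤ start
  · rw [toChars_nonneg start hs]
    have := digitsLen_le start.toNat (by omega)
    omega
  · have hneg : start < 0 := by omega
    unfold PySem.Int.toChars
    rw [if_pos hneg]
    simp only [List.length_cons]
    have := digitsLen_le start.natAbs (by omega)
    omega

-- the shared preamble value is ≥ 1 and < 10^6 on Dom ∩ Pre_
theorem preamble_facts (start : Int)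
    (hdm : -2147483648 ≤ start ∧ start ≤ 2147483648)
    (hpre : Pre_find_invalid_ids start 0) :
    1 ≤ (if PySem.Int.band ((PySem.Int.toChars start).length : Int) 1 = 0 then
          (PySem.Int.ofChars? (PySem.List.slice (PySem.Int.toChars start) none
            (some (PySem.Int.floordiv ((PySem.Int.toChars start).length : Int) 2)))).getD 0
        else
          (10 : Int) ^ (PySem.Int.floordiv ((PySem.Int.toChars start).length : Int) 2).toNat) ∧
    (if PySem.Int.band ((PySem.Int.toChars start).length : Int) 1 = 0 then
          (PySem.Int.ofChars? (PySem.List.slice (PySem.Int.toChars start) none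
            (some (PySem.Int.floordiv ((PySem.Int.toChars start).length : Int) 2)))).getD 0
        else
          (10 : Int) ^ (PySem.Int.floordiv ((PySem.Int.toChars start).length : Int) 2).toNat)
      < (10 : Int) ^ (6 : Nat) := by
  set len := (PySem.Int.toChars start).length with hlen
  have hband : PySem.Int.band ((len : Nat) : Int) 1 = ((len &&& 1 : Nat) : Int) :=
    PySem.Int.band_natCast len 1
  have hand : len &&& 1 = len % 2 := Nat.and_one_is_mod len
  have hfd : PySem.Int.floordiv ((len : Nat) : Int) 2 = ((len / 2 : Nat) : Int) := by
    exact_mod_cast PySem.Int.floordiv_natCast len 2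
  have hlen11 : len ≤ 11 := toChars_len_le start hdm
  have hlenpos : 1 ≤ len := by
    rw [hlen]
    by_cases hs : 0 ≤ start
    · rw [toChars_nonneg start hs]
      exact List.length_pos_iff.mpr (toDigits_ne_nil _)
    · unfold PySem.Int.toChars
      rw [if_pos (by omega)]
      simp
  by_cases hpar : len % 2 = 0
  · -- even branch: Pre_ forces 0 ≤ start
    have hs : 0 ≤ start := by
      rcases hpre with hs | hodd
      · exact hs
      · rw [← hlen] at hodd; omega
    have hcond : PySem.Int.band ((len : Nat) : Int) 1 = 0 := by
      rw [hband, hand, hpar]; rfl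
    rw [if_pos hcond]
    have hdig : PySem.Int.toChars start = Nat.toDigits 10 start.toNat := toChars_nonneg start hs
    have hlen2 : 2 ≤ len := by
      by_contra hl
      have : len = 1 := by omega
      omega
    have hm10 : 10 ≤ start.toNat := by
      by_contra hm
      have hsm : start.toNat < 10 := by omega
      have : Nat.toDigits 10 start.toNat = [start.toNat.digitChar] := by
        rw [Nat.toDigits_eq_if (by norm_num), if_pos hsm]
      rw [hlen, hdig, this] at hlen2
      simp at hlen2
    rw [hfd, hdig]
    rw [PySem.List.slice_to_natCast]
    have hlend : len = (Nat.toDigits 10 start.toNat).length := by rw [hlen, hdig]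
    have htake_digits : ∀ c ∈ (Nat.toDigits 10 start.toNat).take (len / 2), c.isDigit = true :=
      fun c hc => toDigits_digits start.toNat c (List.mem_of_mem_take hc)
    have htake_ne : (Nat.toDigits 10 start.toNat).take (len / 2) ≠ [] := by
      have : 1 ≤ len / 2 := by omega
      have hl : ((Nat.toDigits 10 start.toNat).take (len / 2)).length = len / 2 := by
        rw [List.length_take]
        omega
      intro hnil
      rw [hnil] at hl
      simp at hl
      omega
    rw [key' _ htake_ne htake_digits]
    simp only [Option.getD_some]
    rw [V_take start.toNat (len / 2) (by omega)]
    constructor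
    · have hlb := (toDigits_len_bounds start.toNat (by omega)).1
      rw [← hlend] at hlb
      have hexp : (10 : Nat) ^ ((Nat.toDigits 10 start.toNat).length - len / 2)
          ≤ 10 ^ (len - 1) := Nat.pow_le_pow_right (by norm_num) (by omega)
      have : 1 ≤ start.toNat / 10 ^ ((Nat.toDigits 10 start.toNat).length - len / 2) := by
        rw [Nat.le_div_iff_mul_le (by positivity)]
        omega
      exact_mod_cast this
    · have hVlt : V ((Nat.toDigits 10 start.toNat).take (len / 2)) < 10 ^ (len / 2) := by
        have := V_lt _ htake_digits
        rwa [List.length_take, min_eq_left (by omega)] at this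
      rw [V_take start.toNat (len / 2) (by omega)] at hVlt
      have hlen10 : len ≤ 10 := by
        rw [hlend]
        exact digitsLen_le start.toNat (by omega)
      calc ((start.toNat / 10 ^ ((Nat.toDigits 10 start.toNat).length - len / 2) : Nat) : Int)
          < ((10 ^ (len / 2) : Nat) : Int) := by exact_mod_cast hVlt
        _ ≤ ((10 ^ 5 : Nat) : Int) := by
            have : (10 : Nat) ^ (len / 2) ≤ 10 ^ 5 := Nat.pow_le_pow_right (by norm_num) (by omega)
            exact_mod_cast this
        _ < (10 : Int) ^ (6 : Nat) := by norm_num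
  · -- odd branch
    have hcond : ¬ PySem.Int.band ((len : Nat) : Int) 1 = 0 := by
      rw [hband, hand]
      have : len % 2 = 1 := by omega
      rw [this]
      norm_num
    rw [if_neg hcond, hfd]
    constructor
    · exact one_le_pow₀ (by norm_num)
    · have : ((((len / 2 : Nat) : Int)).toNat) = len / 2 := by omega
      rw [this]
      exact pow_lt_pow_right₀ (by norm_num) (by omega)

theorem main_equiv (start end_ : Int) (hdom : Dom_find_invalid_ids start end_)
    (hpre : Pre_find_invalid_ids start end_) :
    find_invalid_ids start end_ = find_invalid_ids_alt start end_ := by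
  unfold Dom_find_invalid_ids pvDomInt at hdom
  simp only [Bool.and_eq_true, decide_eq_true_eq] at hdom
  obtain ⟨hds, hde⟩ := hdom
  unfold find_invalid_ids find_invalid_ids_alt
  show findLoopA start end_ 100000
      (if PySem.Int.band ((PySem.Int.toChars start).length : Int) 1 = 0 then
        (PySem.Int.ofChars? (PySem.List.slice (PySem.Int.toChars start) none
          (some (PySem.Int.floordiv ((PySem.Int.toChars start).length : Int) 2)))).getD 0
      else
        (10 : Int) ^ (PySem.Int.floordiv ((PySem.Int.toChars start).length : Int) 2).toNat) []
    = findLoopB start end_ 40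
      (if PySem.Int.band ((PySem.Int.toChars start).length : Int) 1 = 0 then
        (PySem.Int.ofChars? (PySem.List.slice (PySem.Int.toChars start) none
          (some (PySem.Int.floordiv ((PySem.Int.toChars start).length : Int) 2)))).getD 0
      else
        (10 : Int) ^ (PySem.Int.floordiv ((PySem.Int.toChars start).length : Int) 2).toNat) []
  obtain ⟨h1, hlt6⟩ := preamble_facts start hds hpre
  set h0 := (if PySem.Int.band ((PySem.Int.toChars start).length : Int) 1 = 0 then
        (PySem.Int.ofChars? (PySem.List.slice (PySem.Int.toChars start) none
          (some (PySem.Int.floordiv ((PySem.Int.toChars start).length : Int) 2)))).getD 0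
      else
        (10 : Int) ^ (PySem.Int.floordiv ((PySem.Int.toChars start).length : Int) 2).toNat) with hh0
  have hd6 : digN h0 ≤ 6 := digN_le h0 6 h1 hlt6
  have hd1 : 1 ≤ digN h0 := digN_pos h0
  have hend : end_ < (10 : Int) ^ (digN h0 - 1 + 40) := by
    calc end_ ≤ 2147483648 := hde.2
      _ < (10 : Int) ^ (10 : Nat) := by norm_num
      _ ≤ (10 : Int) ^ (digN h0 - 1 + 40) := pow_le_pow_right₀ (by norm_num) (by omega)
  obtain ⟨H, hH1, hH2, hH3, hB⟩ := loopB_eq start end_ 40 h0 [] h1 hend (by omega)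
  have hfuel : (H - h0).toNat ≤ 100000 := by
    by_cases hHh : H = h0
    · omega
    · have hlt : h0 < H := by omega
      have hc := hH2 (H - 1) (by omega) (by omega)
      have h1H : 1 ≤ H - 1 := by omega
      have hub := (digN_bounds (H - 1) h1H).2
      have hsq : (H - 1) * (H - 1) < candV (H - 1) := by
        unfold candV
        nlinarith [pow_pos (by norm_num : (0:Int) < 10) (digN (H - 1))]
      have hHb : H - 1 ≤ 46340 := by nlinarith [hde.2]
      omega
  rw [loopA_eq start end_ 100000 h0 H [] h1 hH1 hH2 hH3 hfuel, hB]

-- ===== VERDICT (by name: the statement is the Claim_ definition above) =====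
theorem find_invalid_ids_spec : Claim_equal_find_invalid_ids := by
  intro start end_ hdom hpre
  unfold Spec_find_invalid_ids
  exact main_equiv start end_ hdom hpre
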